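-- pv_equiv track=rewrite | github.com/marc-dietrich/tensorflow_model_inference | dse_genetic_nn_pipeline.py | get_group_ranges
-- ===== SOURCE A (Python) =====
-- def get_group_ranges(ind):
--     ranges = {
--         core_id: None for core_id in range(num_cores)
--     }
--     for core_id in range(num_cores):
--         starting = 0
--         for idx in ind:
--             if core_id == idx:
--                 ranges[core_id] = [starting, 0]
--                 break
--             starting += 1
--     ind.reverse()
--     for core_id in range(num_cores - 1, -1, -1):
--         ending = num_stages - 1
--         for idx in ind:
--             if core_id == idx:
--                 ranges[core_id][1] = ending
--                 break
--             ending -= 1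
--     ind.reverse()
--     return ranges
--
-- num_stages = 23
--
-- num_cores = 32
-- ===== SOURCE B (Python) =====
-- num_stages = 23
--
-- num_cores = 32
--
--
-- def get_group_ranges(ind):
--     first = {}
--     last = {}
--     for i, v in enumerate(ind):
--         if v not in first:
--             first[v] = i
--         last[v] = i
--     n = len(ind)
--     return {
--         c: None if c not in first
--         else [first[c], num_stages - 1 - (n - 1 - last[c])]
--         for c in range(num_cores)
--     }
-- ===== Notes on version B (the rewrite author's own statement) =====
-- stated objective: faster
-- what changed: A scans ind once per core forward and once per core over the reversed list (2*num_cores passes); B makes one pass over enumerate(ind) recording each value's first and last occurrence index in two dicts and then reads every core's range off in O(1).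
import Mathlib
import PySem

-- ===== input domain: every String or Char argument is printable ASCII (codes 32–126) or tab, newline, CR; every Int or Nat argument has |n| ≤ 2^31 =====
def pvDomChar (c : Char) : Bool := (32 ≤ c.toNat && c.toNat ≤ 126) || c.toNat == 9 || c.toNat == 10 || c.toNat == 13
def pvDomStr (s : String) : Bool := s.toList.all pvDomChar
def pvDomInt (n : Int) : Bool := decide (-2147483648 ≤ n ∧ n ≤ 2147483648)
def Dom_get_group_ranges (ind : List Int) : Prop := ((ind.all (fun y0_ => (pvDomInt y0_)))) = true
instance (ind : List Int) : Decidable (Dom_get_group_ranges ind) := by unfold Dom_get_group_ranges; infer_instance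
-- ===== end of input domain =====

-- B replaces A's per-core scans (num_cores passes over ind, forward and reversed) by ONE pass over ind
-- recording each value's first and last occurrence index, then reads the ranges off per core.
-- A reverses `ind` in place and reverses it back before returning, so the argument is unchanged on return.

-- module constants
def pvNumStages : Int := 23
def pvNumCores : Int := 32

-- ===== PORT A =====
-- inner `for idx in ind: … break` of the first loop (starting counter, break on match)
def pvScanFirst (c starting : Int) (l : List Int)
    (d : PySem.Dict Int (Option (List Int))) : PySem.Dict Int (Option (List Int)) :=
  match l with
  | [] => d
  | idx :: rest =>
      if c == idx then d.insert c (some [starting, 0])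
      else pvScanFirst c (starting + 1) rest d

-- `ranges[core_id][1] = ending` (Python would raise TypeError on None; unreachable, kept as identity)
def pvSet1 (e : Int) : Option (List Int) → Option (List Int)
  | some l => some (l.set 1 e)
  | none => none

-- inner `for idx in ind: … break` of the second loop (ending counter, break on match)
def pvScanLast (c ending : Int) (l : List Int)
    (d : PySem.Dict Int (Option (List Int))) : PySem.Dict Int (Option (List Int)) :=
  match l with
  | [] => d
  | idx :: rest =>
      if c == idx then d.modify c none (pvSet1 ending)
      else pvScanLast c (ending - 1) rest d

def get_group_ranges (ind : List Int) : List (Int × Option (List Int)) :=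
  let ranges : PySem.Dict Int (Option (List Int)) :=
    (PySem.List.pyRange 0 pvNumCores 1).foldl (fun d c => d.insert c none) PySem.Dict.empty
  let ranges := (PySem.List.pyRange 0 pvNumCores 1).foldl (fun d c => pvScanFirst c 0 ind d) ranges
  let indr := ind.reverse   -- ind.reverse() in place; reversed back before return
  let ranges := (PySem.List.pyRange (pvNumCores - 1) (-1) (-1)).foldl
      (fun d c => pvScanLast c (pvNumStages - 1) indr d) ranges
  ranges.items

-- ===== PORT B =====
-- one pass over enumerate(ind): first occurrence kept, last occurrence overwritten
def pvFirstLast (ind : List Int) : PySem.Dict Int Int × PySem.Dict Int Int :=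
  (PySem.List.enumerate ind 0).foldl
    (fun fl p =>
      (if fl.1.contains p.2 then fl.1 else fl.1.insert p.2 p.1, fl.2.insert p.2 p.1))
    (PySem.Dict.empty, PySem.Dict.empty)

def get_group_ranges_alt (ind : List Int) : List (Int × Option (List Int)) :=
  let fl := pvFirstLast ind
  let n : Int := ind.length
  (PySem.List.pyRange 0 pvNumCores 1).map (fun c =>
    (c, match fl.1.get? c, fl.2.get? c with
        | some fi, some li => some [fi, pvNumStages - 1 - (n - 1 - li)]
        | _, _ => none))    -- `c not in first` ⇒ None; last[c] exists whenever first[c] does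

-- ===== PRECONDITION & SPEC =====
def Spec_get_group_ranges (ind : List Int) (out : List (Int × Option (List Int))) : Prop := out = get_group_ranges_alt ind
instance (ind : List Int) (out : List (Int × Option (List Int))) : Decidable (Spec_get_group_ranges ind out) := by unfold Spec_get_group_ranges; infer_instance

-- ===== CLAIM (what is proved, stated in full; the proofs are below) =====
def Claim_equal_get_group_ranges : Prop := ∀ (ind : List Int), Dom_get_group_ranges ind → Spec_get_group_ranges ind (get_group_ranges ind)

-- ===== LEMMAS AND PROOFS =====

-- index (counting from s) of the first occurrence of c in l
def pvFirstAt (c s : Int) : List Int → Option Int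
  | [] => none
  | x :: r => if c == x then some s else pvFirstAt c (s + 1) r

-- index (counting from i) of the last occurrence of c in l
def pvLastAt (c i : Int) : List Int → Option Int
  | [] => none
  | x :: r =>
      match pvLastAt c (i + 1) r with
      | some j => some j
      | none => if c == x then some i else none

theorem pvFirstAt_shift (c : Int) (l : List Int) (s t : Int) :
    pvFirstAt c s l = (pvFirstAt c t l).map (fun j => j + (s - t)) := by
  induction l generalizing s t with
  | nil => rfl
  | cons x r ih =>
      simp only [pvFirstAt]
      by_cases h : c == x
      · simp [h]
      · simp only [h, Bool.false_eq_true, ite_false]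
        rw [ih (s+1) (t+1)]
        congr 1; funext j; ring_nf

theorem pvFirstAt_none_iff (c s : Int) (l : List Int) :
    pvFirstAt c s l = none ↔ c ∉ l := by
  induction l generalizing s with
  | nil => simp [pvFirstAt]
  | cons x r ih =>
      simp only [pvFirstAt, List.mem_cons]
      by_cases h : c == x
      · simp [beq_iff_eq.mp h]
      · have hne : c ≠ x := fun e => by simp [e] at h
        simp [h, ih (s+1), hne]

theorem pvFirstAt_append_singleton (c : Int) (x s : Int) (l : List Int) :
    pvFirstAt c s (l ++ [x]) =
      match pvFirstAt c s l with
      | some j => some j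
      | none => if c == x then some (s + l.length) else none := by
  induction l generalizing s with
  | nil => simp [pvFirstAt]
  | cons y r ih =>
      simp only [List.cons_append, pvFirstAt]
      by_cases h : c == y
      · simp [h]
      · simp only [h, Bool.false_eq_true, ite_false]
        rw [ih (s+1)]
        cases pvFirstAt c (s+1) r with
        | some j => rfl
        | none => simp; ring_nf

theorem pvLastAt_eq_firstAt_reverse (c : Int) (l : List Int) (i : Int) :
    pvLastAt c i l = (pvFirstAt c 0 l.reverse).map (fun p => i + ((l.length : Int) - 1 - p)) := by
  induction l generalizing i with
  | nil => rfl
  | cons x r ih =>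
      simp only [pvLastAt, List.reverse_cons]
      rw [pvFirstAt_append_singleton, ih (i+1)]
      cases hfr : pvFirstAt c 0 r.reverse with
      | some p => simp; ring
      | none =>
          simp only [Option.map_none]
          by_cases h : c == x
          · simp [h, List.length_reverse]
          · simp [h]

-- the dicts built by B's single pass, characterised
theorem pvFirstLast_fst_get? (c : Int) (l : List Int) (i : Int)
    (f g : PySem.Dict Int Int) :
    ((PySem.List.enumerate l i).foldl
        (fun fl p =>
          (if fl.1.contains p.2 then fl.1 else fl.1.insert p.2 p.1, fl.2.insert p.2 p.1))
        (f, g)).1.get? c =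
      match f.get? c with
      | some w => some w
      | none => pvFirstAt c i l := by
  induction l generalizing i f g with
  | nil =>
      simp only [PySem.List.enumerate_nil, List.foldl_nil]
      cases f.get? c <;> rfl
  | cons x r ih =>
      rw [PySem.List.enumerate_cons, List.foldl_cons, ih]
      by_cases hx : f.contains x
      · simp only [hx, if_true]
        cases hf : f.get? c with
        | some w => rfl
        | none =>
            simp only [pvFirstAt]
            by_cases h : c == x
            · -- c = x but f.contains x with f.get? c = none: contradiction
              exfalso
              have : f.contains c = true := by rw [beq_iff_eq.mp h]; exact hx
              rw [PySem.Dict.contains_eq_isSome_get?, hf] at this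
              simp at this
            · simp [h]
      · simp only [hx, Bool.false_eq_true, if_false]
        by_cases h : c = x
        · subst h
          rw [PySem.Dict.get?_insert_self]
          have : f.get? c = none := by
            rw [PySem.Dict.contains_eq_isSome_get?] at hx
            cases hfc : f.get? c <;> simp [hfc] at hx ⊢
          simp [this, pvFirstAt]
        · rw [PySem.Dict.get?_insert_of_ne _ _ h]
          cases f.get? c with
          | some w => rfl
          | none => simp [pvFirstAt, h]

theorem pvFirstLast_snd_get? (c : Int) (l : List Int) (i : Int)
    (f g : PySem.Dict Int Int) :
    ((PySem.List.enumerate l i).foldl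
        (fun fl p =>
          (if fl.1.contains p.2 then fl.1 else fl.1.insert p.2 p.1, fl.2.insert p.2 p.1))
        (f, g)).2.get? c =
      match pvLastAt c i l with
      | some j => some j
      | none => g.get? c := by
  induction l generalizing i f g with
  | nil =>
      simp only [PySem.List.enumerate_nil, List.foldl_nil]
      cases g.get? c <;> rfl
  | cons x r ih =>
      rw [PySem.List.enumerate_cons, List.foldl_cons, ih]
      simp only [pvLastAt]
      cases hr : pvLastAt c (i+1) r with
      | some j => rfl
      | none =>
          by_cases h : c = x
          · subst h; simp [PySem.Dict.get?_insert_self]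
          · rw [PySem.Dict.get?_insert_of_ne _ _ h]
            have hb : (c == x) = false := by simp [h]
            simp [hb]

-- ===== A-side: dicts of the shape ⟨cs.map (a, v a)⟩ =====

-- insert at a present key rewrites that entry in place
theorem pvInsert_map (cs : List Int) (v : Int → Option (List Int)) (c : Int)
    (hc : c ∈ cs) (x : Option (List Int)) :
    (PySem.Dict.mk (cs.map (fun a => (a, v a)))).insert c x
      = PySem.Dict.mk (cs.map (fun a => (a, if a == c then x else v a))) := by
  have hcont : (PySem.Dict.mk (cs.map (fun a => (a, v a)))).contains c = true := by
    rw [PySem.Dict.contains_iff_mem_keys]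
    simp [PySem.Dict.keys, hc]
  apply PySem.Dict.ext
  rw [PySem.Dict.items_insert_of_contains _ _ hcont]
  show (cs.map _).map _ = _
  rw [List.map_map]
  apply List.map_congr_left
  intro a _
  by_cases h : a == c
  · simp [beq_iff_eq.mp h]
  · have hne : a ≠ c := fun e => h (by simp [e])
    simp [h, hne]

theorem pvGetD_map (cs : List Int) (hnd : cs.Nodup) (v : Int → Option (List Int)) (c : Int)
    (hc : c ∈ cs) :
    (PySem.Dict.mk (cs.map (fun a => (a, v a)))).getD c none = v c := by
  have hmem : (c, v c) ∈ List.map (fun a => (a, v a)) cs := List.mem_map_of_mem hc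
  have hk : (PySem.Dict.mk (cs.map (fun a => (a, v a)))).keys.Nodup := by
    have hkeys : (PySem.Dict.mk (cs.map (fun a => (a, v a)))).keys = cs := by
      simp only [PySem.Dict.keys, List.map_map]
      show List.map id cs = cs
      exact List.map_id cs
    rw [hkeys]; exact hnd
  exact PySem.Dict.getD_of_mem_items _ hmem hk none

-- a fold of per-key steps over a map-shaped dict, each step touching only its own key
theorem pvFold_map (step : PySem.Dict Int (Option (List Int)) → Int → PySem.Dict Int (Option (List Int)))
    (upd : Int → Option (List Int) → Option (List Int))
    (hstep : ∀ (cs : List Int) (v : Int → Option (List Int)) (c : Int), cs.Nodup → c ∈ cs →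
      step (PySem.Dict.mk (cs.map (fun a => (a, v a)))) c
        = PySem.Dict.mk (cs.map (fun a => (a, if a == c then upd a (v a) else v a))))
    (ds : List Int) (cs : List Int) (v : Int → Option (List Int))
    (hnd : cs.Nodup) (hd : ds.Nodup) (hsub : ∀ d ∈ ds, d ∈ cs) :
    List.foldl step (PySem.Dict.mk (cs.map (fun a => (a, v a)))) ds
      = PySem.Dict.mk (cs.map (fun a => (a, if a ∈ ds then upd a (v a) else v a))) := by
  induction ds generalizing v with
  | nil => simp
  | cons d ds' ih =>
      rw [List.foldl_cons, hstep cs v d hnd (hsub d (List.mem_cons_self))]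
      rw [ih (fun a => if a == d then upd a (v a) else v a) (List.Nodup.of_cons hd)
            (fun e he => hsub e (List.mem_cons_of_mem d he))]
      congr 1
      apply List.map_congr_left
      intro a _
      by_cases had : a = d
      · subst had
        have : a ∉ ds' := (List.nodup_cons.mp hd).1
        simp [this]
      · have h1 : (a == d) = false := by simp [had]
        simp only [h1, Bool.false_eq_true, if_false, List.mem_cons]
        by_cases h2 : a ∈ ds' <;> simp [h2, had]

-- the first inner scan, characterised
theorem pvScanFirst_eq (c s : Int) (l : List Int) (d : PySem.Dict Int (Option (List Int))) :
    pvScanFirst c s l d =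
      match pvFirstAt c s l with
      | none => d
      | some j => d.insert c (some [j, 0]) := by
  induction l generalizing s with
  | nil => rfl
  | cons x r ih =>
      simp only [pvScanFirst, pvFirstAt]
      by_cases h : c == x
      · simp [h]
      · simp [h, ih (s+1)]

-- the second inner scan, characterised
theorem pvScanLast_eq (c e : Int) (l : List Int) (d : PySem.Dict Int (Option (List Int))) :
    pvScanLast c e l d =
      match pvFirstAt c 0 l with
      | none => d
      | some p => d.modify c none (pvSet1 (e - p)) := by
  induction l generalizing e with
  | nil => rfl
  | cons x r ih =>
      simp only [pvScanLast, pvFirstAt]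
      by_cases h : c == x
      · simp [h]
      · simp only [h, Bool.false_eq_true, if_false]
        rw [ih (e-1), pvFirstAt_shift c r (0+1) 0]
        cases pvFirstAt c 0 r with
        | none => rfl
        | some p => simp; ring_nf

-- the two per-core updates A performs, as value transformers
def pvUpd1 (ind : List Int) (c : Int) (w : Option (List Int)) : Option (List Int) :=
  match pvFirstAt c 0 ind with
  | none => w
  | some j => some [j, 0]

def pvUpd2 (ind : List Int) (c : Int) (w : Option (List Int)) : Option (List Int) :=
  match pvFirstAt c 0 ind.reverse with
  | none => w
  | some p => pvSet1 (pvNumStages - 1 - p) w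

theorem pvStep1_map (ind : List Int) (cs : List Int) (v : Int → Option (List Int)) (c : Int)
    (_hnd : cs.Nodup) (hc : c ∈ cs) :
    pvScanFirst c 0 ind (PySem.Dict.mk (cs.map (fun a => (a, v a))))
      = PySem.Dict.mk (cs.map (fun a => (a, if a == c then pvUpd1 ind a (v a) else v a))) := by
  rw [pvScanFirst_eq]
  cases hf : pvFirstAt c 0 ind with
  | none =>
      dsimp only
      congr 1
      apply List.map_congr_left
      intro a _
      by_cases h : a == c
      · have := beq_iff_eq.mp h; subst this
        simp [pvUpd1, hf]
      · simp [h]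
  | some j =>
      dsimp only
      rw [pvInsert_map cs v c hc]
      congr 1
      apply List.map_congr_left
      intro a _
      by_cases h : a == c
      · have := beq_iff_eq.mp h; subst this
        simp [pvUpd1, hf]
      · simp [h]

theorem pvStep2_map (ind : List Int) (cs : List Int) (v : Int → Option (List Int)) (c : Int)
    (hnd : cs.Nodup) (hc : c ∈ cs) :
    pvScanLast c (pvNumStages - 1) ind.reverse (PySem.Dict.mk (cs.map (fun a => (a, v a))))
      = PySem.Dict.mk (cs.map (fun a => (a, if a == c then pvUpd2 ind a (v a) else v a))) := by
  rw [pvScanLast_eq]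
  cases hf : pvFirstAt c 0 ind.reverse with
  | none =>
      dsimp only
      congr 1
      apply List.map_congr_left
      intro a _
      by_cases h : a == c
      · have := beq_iff_eq.mp h; subst this
        simp [pvUpd2, hf]
      · simp [h]
  | some p =>
      dsimp only
      rw [PySem.Dict.modify, pvGetD_map cs hnd v c hc, pvInsert_map cs v c hc]
      congr 1
      apply List.map_congr_left
      intro a _
      by_cases h : a == c
      · have := beq_iff_eq.mp h; subst this
        simp [pvUpd2, hf]
      · simp [h]

-- A's result in closed per-core form
theorem get_group_ranges_char (ind : List Int) :
    get_group_ranges ind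
      = (PySem.List.pyRange 0 pvNumCores 1).map
          (fun c => (c, pvUpd2 ind c (pvUpd1 ind c none))) := by
  unfold get_group_ranges
  have hnd : (PySem.List.pyRange 0 pvNumCores 1).Nodup := by decide
  have hinit : (PySem.List.pyRange 0 pvNumCores 1).foldl
      (fun d c => d.insert c none) PySem.Dict.empty
      = PySem.Dict.mk ((PySem.List.pyRange 0 pvNumCores 1).map
          (fun a => (a, (none : Option (List Int))))) := by rfl
  dsimp only
  rw [hinit]
  rw [pvFold_map _ (pvUpd1 ind) (fun cs v c hn hc => pvStep1_map ind cs v c hn hc)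
        _ _ _ hnd hnd (fun d hd => hd)]
  rw [pvFold_map _ (pvUpd2 ind) (fun cs v c hn hc => pvStep2_map ind cs v c hn hc)
        _ _ _ hnd (by decide) (by decide)]
  show (PySem.Dict.mk _).items = _
  apply List.map_congr_left
  intro a ha
  have h1 : a ∈ PySem.List.pyRange 0 pvNumCores 1 := ha
  have h2 : a ∈ PySem.List.pyRange (pvNumCores - 1) (-1) (-1) := by
    revert h1; revert a; decide
  simp [h1, h2]

-- ===== VERDICT (by name: the statement is the Claim_ definition above) =====
theorem get_group_ranges_spec : Claim_equal_get_group_ranges := by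
  intro ind _
  show get_group_ranges ind = get_group_ranges_alt ind
  rw [get_group_ranges_char]
  unfold get_group_ranges_alt pvFirstLast
  apply List.map_congr_left
  intro c hc
  rw [pvFirstLast_fst_get?, pvFirstLast_snd_get?]
  simp only [PySem.Dict.get?_empty]
  cases hf : pvFirstAt c 0 ind with
  | none =>
      have hmem : c ∉ ind := (pvFirstAt_none_iff c 0 ind).mp hf
      have hfr : pvFirstAt c 0 ind.reverse = none :=
        (pvFirstAt_none_iff c 0 ind.reverse).mpr (by simpa using hmem)
      simp [pvUpd1, pvUpd2, hf, hfr]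
  | some j =>
      have hmem : c ∈ ind := by
        by_contra hmem
        simp [(pvFirstAt_none_iff c 0 ind).mpr hmem] at hf
      have : pvFirstAt c 0 ind.reverse ≠ none := fun h =>
        ((pvFirstAt_none_iff c 0 ind.reverse).mp h) (by simpa using hmem)
      cases hfr : pvFirstAt c 0 ind.reverse with
      | none => exact absurd hfr this
      | some p =>
          have hl : pvLastAt c 0 ind = some ((ind.length : Int) - 1 - p) := by
            rw [pvLastAt_eq_firstAt_reverse, hfr]; simp
          simp [pvUpd1, pvUpd2, hf, hfr, hl, pvSet1]
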